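-- pv_equiv track=rewrite | github.com/Han-16/Algorithm | 프로그래머스/unrated/181922. 수열과 구간 쿼리 4/수열과 구간 쿼리 4.py | solution
-- ===== SOURCE A (Python) =====
-- def solution(arr, queries):
--     for s, e, k in queries:
--         for i in range(s, e+1):
--             if i == 0:
--                 pass
--             if k == 0:
--                 pass
--             elif i % k == 0:
--                 arr[i] += 1
--     return arr
-- ===== SOURCE B (Python) =====
-- def solution(arr, queries):
--     # Jump through the multiples of |k| with a while loop instead of scanning
--     # every index of [s, e]; mutates arr in place exactly like the original.
--     for s, e, k in queries:
--         if k: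
--             kk = -k if k < 0 else k
--             i = -(-s // kk) * kk      # first multiple of kk that is >= s
--             while i <= e:
--                 arr[i] += 1
--                 i += kk
--     return arr
-- ===== Notes on version B (the rewrite author's own statement) =====
-- stated objective: alternative
-- what changed: Instead of scanning every index i in [s,e] and testing i % k == 0, B computes the first multiple of |k| that is >= s in O(1) and advances a while-loop cursor in steps of |k|, touching only the incremented indices.
import Mathlib
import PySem

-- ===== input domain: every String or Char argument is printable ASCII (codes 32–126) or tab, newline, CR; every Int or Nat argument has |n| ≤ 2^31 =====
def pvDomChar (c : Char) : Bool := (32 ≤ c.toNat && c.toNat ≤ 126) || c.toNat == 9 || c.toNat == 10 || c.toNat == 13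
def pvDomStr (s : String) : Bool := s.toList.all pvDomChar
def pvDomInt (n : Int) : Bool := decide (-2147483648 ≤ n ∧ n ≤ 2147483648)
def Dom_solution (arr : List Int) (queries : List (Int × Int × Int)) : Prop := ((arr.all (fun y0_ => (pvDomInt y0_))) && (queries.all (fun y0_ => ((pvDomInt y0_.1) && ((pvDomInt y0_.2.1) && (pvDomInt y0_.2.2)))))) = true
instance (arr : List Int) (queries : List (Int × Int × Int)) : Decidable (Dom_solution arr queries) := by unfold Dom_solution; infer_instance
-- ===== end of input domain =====

-- B replaces A's scan of every index in [s, e] by a while-loop cursor that starts at the first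
-- multiple of |k| ≥ s and advances by |k|, touching only the incremented indices; both Pythons
-- mutate arr in place identically — the equivalence proved here is about the return value.

-- ===== PORT A =====
-- arr[i] += 1 is ported with the total forms pySetD/pyGetD, exact under Pre_solution
-- (which puts every incremented index in range); 'if i == 0: pass' is a no-op and has no port.
def solution (arr : List Int) (queries : List (Int × Int × Int)) : List Int :=
  queries.foldl (fun a q =>
    (PySem.List.pyRange q.1 (q.2.1 + 1) 1).foldl (fun b i =>
      if q.2.2 == 0 then b
      else if PySem.Int.mod i q.2.2 == 0 then
        PySem.List.pySetD b i (PySem.List.pyGetD b i 0 + 1)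
      else b) a) arr

-- ===== PORT B =====
-- the inner 'while i <= e: arr[i] += 1; i += kk' loop, as well-founded recursion on e + 1 - i
def bumpRun (e kk : Int) (hk : 0 < kk) (b : List Int) (i : Int) : List Int :=
  if h : i ≤ e then
    bumpRun e kk hk (PySem.List.pySetD b i (PySem.List.pyGetD b i 0 + 1)) (i + kk)
  else b
termination_by (e + 1 - i).toNat
decreasing_by omega

def solution_alt (arr : List Int) (queries : List (Int × Int × Int)) : List Int :=
  match queries with
  | [] => arr
  | (s, e, k) :: rest =>
      solution_alt
        (if h : k = 0 then arr
         else bumpRun e |k| (abs_pos.mpr h) arr (-(PySem.Int.floordiv (-s) |k|) * |k|))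
        rest

-- ===== PRECONDITION & SPEC =====
-- Pre_ excludes exactly the inputs on which the Python raises IndexError: some query
-- would increment an index outside [-len(arr), len(arr)). The incremented indices of a
-- query are the multiples of |k| in [s, e], an arithmetic progression, so it suffices
-- that its first element (first multiple of |k| ≥ s) and its last (last multiple ≤ e)
-- are in range whenever the progression is nonempty.
def Pre_solution (arr : List Int) (queries : List (Int × Int × Int)) : Prop :=
  ∀ q ∈ queries, q.2.2 ≠ 0 →
    -(PySem.Int.floordiv (-q.1) |q.2.2|) * |q.2.2| ≤ q.2.1 →
      PySem.Raise.InRange arr.length (-(PySem.Int.floordiv (-q.1) |q.2.2|) * |q.2.2|) ∧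
      PySem.Raise.InRange arr.length (PySem.Int.floordiv q.2.1 |q.2.2| * |q.2.2|)
instance (arr : List Int) (queries : List (Int × Int × Int)) : Decidable (Pre_solution arr queries) := by unfold Pre_solution; infer_instance
def pvWitness_solution : List Int × (List (Int × Int × Int)) := ([3, 1, 4, 1, 5], [(0, 4, 2), (1, 3, 1)])

def Spec_solution (arr : List Int) (queries : List (Int × Int × Int)) (out : List Int) : Prop := out = solution_alt arr queries
instance (arr : List Int) (queries : List (Int × Int × Int)) (out : List Int) : Decidable (Spec_solution arr queries out) := by unfold Spec_solution; infer_instance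

-- ===== CLAIM (what is proved, stated in full; the proofs are below) =====
def Claim_equal_solution : Prop := ∀ (arr : List Int) (queries : List (Int × Int × Int)), Dom_solution arr queries → Pre_solution arr queries → Spec_solution arr queries (solution arr queries)

-- ===== LEMMAS AND PROOFS =====

-- pyRange with positive step: empty and cons unfoldings.
lemma stepRange_nil {m t kk : Int} (hk : 0 < kk) (h : t ≤ m) :
    PySem.List.pyRange m t kk = [] := by
  rw [PySem.List.pyRange_of_pos _ _ hk]
  simp [not_lt.mpr h]

lemma stepRange_cons {m t kk : Int} (hk : 0 < kk) (h : m < t) :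
    PySem.List.pyRange m t kk = m :: PySem.List.pyRange (m + kk) t kk := by
  rw [PySem.List.pyRange_of_pos _ _ hk, PySem.List.pyRange_of_pos _ _ hk]
  have hdiv : (t - m + kk - 1) / kk = (t - m - 1) / kk + 1 := by
    have : t - m + kk - 1 = (t - m - 1) + 1 * kk := by ring
    rw [this, Int.add_mul_ediv_right _ _ (by omega)]
  have hnn : 0 ≤ (t - m - 1) / kk := Int.ediv_nonneg (by omega) (by omega)
  by_cases h2 : m + kk < t
  · have h3 : t - (m + kk) + kk - 1 = t - m - 1 := by ring
    rw [if_pos h, if_pos h2, h3, hdiv]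
    have hto : ((t - m - 1) / kk + 1).toNat = ((t - m - 1) / kk).toNat + 1 := by omega
    rw [hto, List.range_succ_eq_map]
    simp only [List.map_cons, List.map_map]
    refine congrArg₂ List.cons (by ring) ?_
    apply List.map_congr_left
    intro x _
    simp only [Function.comp_apply]
    push_cast
    ring
  · rw [if_pos h, if_neg h2, hdiv]
    have hz : (t - m - 1) / kk = 0 := Int.ediv_eq_zero_of_lt (by omega) (by omega)
    rw [hz]
    simp

-- B's while loop computes the fold of the increment step over the |k|-stepped range.
lemma bumpRun_eq_foldl (e kk : Int) (hk : 0 < kk) :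
    ∀ (n : Nat) (b : List Int) (i : Int), (e + 1 - i).toNat ≤ n →
      bumpRun e kk hk b i
        = (PySem.List.pyRange i (e + 1) kk).foldl
            (fun b i => PySem.List.pySetD b i (PySem.List.pyGetD b i 0 + 1)) b := by
  intro n
  induction n with
  | zero =>
    intro b i hle
    rw [bumpRun, dif_neg (by omega), stepRange_nil hk (by omega)]
    rfl
  | succ n ih =>
    intro b i hle
    by_cases h : i ≤ e
    · rw [bumpRun, dif_pos h, stepRange_cons hk (by omega), List.foldl_cons]
      exact ih _ _ (by omega)
    · rw [bumpRun, dif_neg h, stepRange_nil hk (by omega)]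
      rfl

-- key lemma: the indices of [s, t) divisible by k are exactly the |k|-stepped range
-- starting at the first multiple of |k| that is ≥ s.
lemma filter_range_eq (k : Int) (hk : k ≠ 0) :
    ∀ (n : Nat) (s t : Int), (t - s).toNat ≤ n →
      (PySem.List.pyRange s t 1).filter (fun i => PySem.Int.mod i k == 0)
        = PySem.List.pyRange (-(PySem.Int.floordiv (-s) |k|) * |k|) t |k| := by
  have hkk : 0 < |k| := abs_pos.mpr hk
  intro n
  induction n with
  | zero =>
    intro s t hle
    have hts : t ≤ s := by omega
    obtain ⟨hc1, hc2⟩ :=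
      (PySem.Int.neg_floordiv_neg_eq_iff_of_pos (a := s) hkk).mp rfl
    rw [stepRange_nil one_pos hts, stepRange_nil hkk (by omega), List.filter_nil]
  | succ n ih =>
    intro s t hle
    obtain ⟨hc1, hc2⟩ :=
      (PySem.Int.neg_floordiv_neg_eq_iff_of_pos (a := s) hkk).mp rfl
    by_cases hts : t ≤ s
    · rw [stepRange_nil one_pos hts, stepRange_nil hkk (by omega), List.filter_nil]
    · have hst : s < t := by omega
      obtain ⟨hd1, hd2⟩ :=
        (PySem.Int.neg_floordiv_neg_eq_iff_of_pos (a := s + 1) hkk).mp rfl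
      have ihs := ih (s + 1) t (by omega)
      rw [PySem.List.pyRange_one_cons hst, List.filter_cons]
      by_cases hdvd : |k| ∣ s
      · have hmod : PySem.Int.mod s k = 0 :=
          (PySem.Int.mod_eq_zero_iff_dvd s k).mpr ((abs_dvd k s).mp hdvd)
        obtain ⟨d, hd⟩ := hdvd
        have hcd : -(PySem.Int.floordiv (-s) |k|) = d := by
          have h1 : (-(PySem.Int.floordiv (-s) |k|) - 1) * |k| < d * |k| := by
            rw [mul_comm d |k|]; omega
          have h2 : d * |k| ≤ -(PySem.Int.floordiv (-s) |k|) * |k| := by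
            rw [mul_comm d |k|]; omega
          have h3 := lt_of_mul_lt_mul_right h1 (le_of_lt hkk)
          have h4 := le_of_mul_le_mul_right h2 hkk
          omega
        have hstart : -(PySem.Int.floordiv (-s) |k|) * |k| = s := by
          rw [hcd]; linear_combination -hd
        have hcd' : -(PySem.Int.floordiv (-(s + 1)) |k|) = d + 1 := by
          have h1 : (-(PySem.Int.floordiv (-(s + 1)) |k|) - 1) * |k| ≤ d * |k| := by
            rw [mul_comm d |k|]; omega
          have h2 : d * |k| < -(PySem.Int.floordiv (-(s + 1)) |k|) * |k| := by
            rw [mul_comm d |k|]; omega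
          have h3 := le_of_mul_le_mul_right h1 hkk
          have h4 := lt_of_mul_lt_mul_right h2 (le_of_lt hkk)
          omega
        have hstart' : -(PySem.Int.floordiv (-(s + 1)) |k|) * |k| = s + |k| := by
          rw [hcd']; linear_combination -hd
        rw [hstart, stepRange_cons hkk hst]
        simp only [hmod, BEq.rfl, if_true]
        rw [ihs, hstart']
      · have hmod : ¬ PySem.Int.mod s k = 0 := fun h =>
          hdvd ((abs_dvd k s).mpr ((PySem.Int.mod_eq_zero_iff_dvd s k).mp h))
        have hlt : s < -(PySem.Int.floordiv (-s) |k|) * |k| := by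
          rcases lt_or_eq_of_le hc2 with h | h
          · exact h
          · exact absurd ⟨-(PySem.Int.floordiv (-s) |k|), by linear_combination h⟩ hdvd
        have hcc : -(PySem.Int.floordiv (-(s + 1)) |k|) = -(PySem.Int.floordiv (-s) |k|) := by
          have h3 := lt_of_mul_lt_mul_right
            (show (-(PySem.Int.floordiv (-(s + 1)) |k|) - 1) * |k|
                < -(PySem.Int.floordiv (-s) |k|) * |k| by omega) (le_of_lt hkk)
          have h4 := lt_of_mul_lt_mul_right
            (show (-(PySem.Int.floordiv (-s) |k|) - 1) * |k|
                < -(PySem.Int.floordiv (-(s + 1)) |k|) * |k| by omega) (le_of_lt hkk)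
          omega
        have : (PySem.Int.mod s k == 0) = false := by
          simp [hmod]
        rw [this, if_neg (by simp), ihs, hcc]

-- A's per-query scan equals B's per-query while loop, on every accumulator
lemma step_eq (a : List Int) (s e k : Int) :
    (PySem.List.pyRange s (e + 1) 1).foldl (fun b i =>
        if k == 0 then b
        else if PySem.Int.mod i k == 0 then
          PySem.List.pySetD b i (PySem.List.pyGetD b i 0 + 1)
        else b) a
    = (if h : k = 0 then a
       else bumpRun e |k| (abs_pos.mpr h) a (-(PySem.Int.floordiv (-s) |k|) * |k|)) := by
  by_cases h0 : k = 0
  · rw [dif_pos h0]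
    simp only [h0, BEq.rfl, if_true]
    exact PySem.List.foldl_ignore _ _
  · have hb : (k == 0) = false := by simp [h0]
    simp only [hb, Bool.false_eq_true, if_false]
    rw [dif_neg h0,
      bumpRun_eq_foldl e |k| (abs_pos.mpr h0)
        (e + 1 - -(PySem.Int.floordiv (-s) |k|) * |k|).toNat a _ le_rfl,
      PySem.List.foldl_if_eq_foldl_filter
        (fun i => PySem.Int.mod i k == 0)
        (fun b i => PySem.List.pySetD b i (PySem.List.pyGetD b i 0 + 1)),
      filter_range_eq k h0 (e + 1 - s).toNat s (e + 1) le_rfl]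

-- the ports agree unconditionally (Pre_ only marks where the Python raises)
lemma ports_eq (arr : List Int) (queries : List (Int × Int × Int)) :
    solution arr queries = solution_alt arr queries := by
  induction queries generalizing arr with
  | nil => rfl
  | cons q qs ih =>
    obtain ⟨s, e, k⟩ := q
    rw [solution_alt]
    unfold solution
    rw [List.foldl_cons]
    rw [show (PySem.List.pyRange s (e + 1) 1).foldl (fun b i =>
          if k == 0 then b
          else if PySem.Int.mod i k == 0 then
            PySem.List.pySetD b i (PySem.List.pyGetD b i 0 + 1)
          else b) arr
        = _ from step_eq arr s e k]
    exact ih _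

-- ===== VERDICT (by name: the statement is the Claim_ definition above) =====
theorem solution_spec : Claim_equal_solution := by
  intro arr queries _ _
  exact ports_eq arr queries
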